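-- pv_equiv track=rewrite | github.com/virusadk/apptest | parser_stat.py | kol_set_18_menshe
-- ===== SOURCE A (Python) =====
-- def summ_point_set_mass(set_mass):
--     # Создаем пустой массив
--     summ_set_mass = []
--     # Цикл переборки полученного массива
--     for si in (set_mass):
--
--         # Обработка исключений счетчика сумм
--         try:
--             # Парсим строку по заданному символу и присваиваем нужную часть строки переменной
--             s1 = si.split(':')[0]
--             # Парсим строку по заданному символу и присваиваем нужную часть строки переменной
--             s2 = si.split(':')[1]
--             # Получаем сумму переменных
--             summ = int(s1) + int(s2)
--             # Добавляем полученную сумму в массив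
--             summ_set_mass.append(summ)
--         # Выполняется в случае возникновения исключения
--         except:
--             # Пропустить - ничего не выполнять
--             pass
--     # Возвращаем полученный массив значений
--     return(summ_set_mass)
--
-- def kol_set_18_menshe(ov_mass):
--     # Создаем пустой массив
--     set_mass = []
--     # Цикл переборки полученного массива
--     for game in ov_mass:
--
--         try:
--             set = game.split(' ')[0]
--
--             set_mass.append(set)
--         except:
--             pass
--         try:
--             set = game.split(' ')[1]
--
--             set_mass.append(set)
--         except:
--             pass
--         try:
--             set = game.split(' ')[2]
--
--             set_mass.append(set)
--         except:
--             pass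
--         try:
--             set = game.split(' ')[3]
--
--             set_mass.append(set)
--         except:
--             pass
--         try:
--             set = game.split(' ')[4]
--
--             set_mass.append(set)
--         except:
--             pass
--
--     sum_point = summ_point_set_mass(set_mass)
--     i = 0
--     for sum_set_point in sum_point:
--         if sum_set_point < 18:
--             i+=1
--
--     # Возвращаем полученный массив значений
--     return(i)
-- ===== SOURCE B (Python) =====
-- def kol_set_18_menshe(ov_mass):
--     # Frequency-table approach: tally the first five space-tokens of every game
--     # into a dict, then parse each DISTINCT token only once and add its multiplicity.
--     freq = {}
--     for game in ov_mass:
--         for tok in game.split(' ')[:5]: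
--             freq[tok] = freq.get(tok, 0) + 1
--     total = 0
--     for tok, n in freq.items():
--         parts = tok.split(':')
--         if len(parts) >= 2:
--             try:
--                 s = int(parts[0]) + int(parts[1])
--             except ValueError:
--                 continue
--             if s < 18:
--                 total += n
--     return total
-- ===== Notes on version B (the rewrite author's own statement) =====
-- stated objective: faster
-- what changed: Instead of A's staged passes that parse every token occurrence (building a token list, then a sum list, then counting), B tallies token multiplicities into a hash table and parses each DISTINCT token exactly once, adding its multiplicity when the a:b sum is below 18.
import Mathlib
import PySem

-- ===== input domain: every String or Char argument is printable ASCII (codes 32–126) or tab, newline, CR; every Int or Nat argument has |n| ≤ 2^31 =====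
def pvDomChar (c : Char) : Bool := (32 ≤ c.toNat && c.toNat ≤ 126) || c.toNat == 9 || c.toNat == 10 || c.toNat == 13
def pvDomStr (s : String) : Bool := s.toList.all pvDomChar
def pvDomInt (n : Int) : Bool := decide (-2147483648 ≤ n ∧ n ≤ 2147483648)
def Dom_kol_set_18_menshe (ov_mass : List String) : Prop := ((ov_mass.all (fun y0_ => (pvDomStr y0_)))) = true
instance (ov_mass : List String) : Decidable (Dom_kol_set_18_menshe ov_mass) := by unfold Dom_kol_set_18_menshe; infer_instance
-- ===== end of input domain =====

-- B tallies token multiplicities into a hash table first and then parses each distinct token once,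
-- adding its multiplicity — a different algorithm from A's staged per-occurrence parsing passes.

-- shared primitive wrapper: Python's s.split(sep) for a non-empty literal sep (split? is none only for sep = "")
def pySplit (s sep : String) : List String := (PySem.Str.split? s sep).getD []

-- ===== PORT A =====
def summ_point_set_mass (set_mass : List String) : List Int :=
  set_mass.foldl (fun acc si =>
    match PySem.List.pyGet? (pySplit si ":") 0 with
    | none => acc           -- IndexError → except: pass (unreachable: split never returns [])
    | some s1 =>
      match PySem.List.pyGet? (pySplit si ":") 1 with
      | none => acc         -- IndexError → except: pass
      | some s2 =>
        match PySem.Int.ofStr? s1, PySem.Int.ofStr? s2 with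
        | some a, some b => acc ++ [a + b]
        | _, _ => acc       -- ValueError of int() → except: pass
    ) []

def kol_set_18_menshe (ov_mass : List String) : Int :=
  let set_mass := ov_mass.foldl (fun acc game =>
    -- five try-blocks: append game.split(' ')[i] when the index exists, else pass
    let acc := match PySem.List.pyGet? (pySplit game " ") 0 with | some s => acc ++ [s] | none => acc
    let acc := match PySem.List.pyGet? (pySplit game " ") 1 with | some s => acc ++ [s] | none => acc
    let acc := match PySem.List.pyGet? (pySplit game " ") 2 with | some s => acc ++ [s] | none => acc
    let acc := match PySem.List.pyGet? (pySplit game " ") 3 with | some s => acc ++ [s] | none => acc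
    match PySem.List.pyGet? (pySplit game " ") 4 with | some s => acc ++ [s] | none => acc) []
  let sum_point := summ_point_set_mass set_mass
  sum_point.foldl (fun i sum_set_point => if sum_set_point < 18 then i + 1 else i) 0

-- ===== PORT B =====
def kol_set_18_menshe_alt (ov_mass : List String) : Int :=
  -- pass 1: freq[tok] = freq.get(tok, 0) + 1 over the first five space-tokens of each game
  let freq : PySem.Dict String Int := ov_mass.foldl (fun d game =>
    ((pySplit game " ").take 5).foldl (fun d tok => d.insert tok (d.getD tok 0 + 1)) d)
    PySem.Dict.empty
  -- pass 2: over the DISTINCT tokens, parse once, add the multiplicity when the sum is < 18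
  freq.items.foldl (fun total p =>
    match pySplit p.1 ":" with
    | p0 :: p1 :: _ =>          -- len(parts) >= 2
      match PySem.Int.ofStr? p0, PySem.Int.ofStr? p1 with
      | some a, some b => if a + b < 18 then total + p.2 else total
      | _, _ => total           -- ValueError → continue
    | _ => total) 0

-- ===== PRECONDITION & SPEC =====
def Spec_kol_set_18_menshe (ov_mass : List String) (out : Int) : Prop := out = kol_set_18_menshe_alt ov_mass
instance (ov_mass : List String) (out : Int) : Decidable (Spec_kol_set_18_menshe ov_mass out) := by unfold Spec_kol_set_18_menshe; infer_instance

-- ===== CLAIM =====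
def Claim_equal_kol_set_18_menshe : Prop := ∀ (ov_mass : List String), Dom_kol_set_18_menshe ov_mass → Spec_kol_set_18_menshe ov_mass (kol_set_18_menshe ov_mass)

-- ===== LEMMAS AND PROOFS =====

-- the sum A's inner helper attaches to a token, as an Option
def sumOf (si : String) : Option Int :=
  match pySplit si ":" with
  | p0 :: p1 :: _ =>
    match PySem.Int.ofStr? p0, PySem.Int.ofStr? p1 with
    | some a, some b => some (a + b)
    | _, _ => none
  | _ => none

-- the weight a single token occurrence contributes to the final count
def wOf (tok : String) : Int :=
  match sumOf tok with
  | some s => if s < 18 then 1 else 0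
  | none => 0

-- A's helper step, phrased through sumOf
theorem summ_step (acc : List Int) (si : String) :
    (match PySem.List.pyGet? (pySplit si ":") 0 with
     | none => acc
     | some s1 =>
       match PySem.List.pyGet? (pySplit si ":") 1 with
       | none => acc
       | some s2 =>
         match PySem.Int.ofStr? s1, PySem.Int.ofStr? s2 with
         | some a, some b => acc ++ [a + b]
         | _, _ => acc) = acc ++ (sumOf si).toList := by
  rcases h : pySplit si ":" with _ | ⟨p0, _ | ⟨p1, r⟩⟩
  · simp [sumOf, h, pysem]
  · simp [sumOf, h, pysem]
  · simp only [sumOf, h, pysem, PySem.List.pyGet?_zero_cons]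
    rcases ha : PySem.Int.ofStr? p0 with _ | a <;>
      rcases hb : PySem.Int.ofStr? p1 with _ | b <;> simp [ha, hb]

theorem summ_eq (acc : List Int) (l : List String) :
    l.foldl (fun acc si =>
      match PySem.List.pyGet? (pySplit si ":") 0 with
      | none => acc
      | some s1 =>
        match PySem.List.pyGet? (pySplit si ":") 1 with
        | none => acc
        | some s2 =>
          match PySem.Int.ofStr? s1, PySem.Int.ofStr? s2 with
          | some a, some b => acc ++ [a + b]
          | _, _ => acc) acc = acc ++ l.filterMap sumOf := by
  induction l generalizing acc with
  | nil => simp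
  | cons x xs ih =>
    rw [List.foldl_cons, summ_step acc x, ih, List.filterMap_cons]
    rcases sumOf x with _ | s <;> simp

-- A's five per-game appends produce exactly the first five split tokens
theorem five_appends (acc : List String) (p : List String) :
    (let acc := match PySem.List.pyGet? p 0 with | some s => acc ++ [s] | none => acc
     let acc := match PySem.List.pyGet? p 1 with | some s => acc ++ [s] | none => acc
     let acc := match PySem.List.pyGet? p 2 with | some s => acc ++ [s] | none => acc
     let acc := match PySem.List.pyGet? p 3 with | some s => acc ++ [s] | none => acc
     match PySem.List.pyGet? p 4 with | some s => acc ++ [s] | none => acc) = acc ++ p.take 5 := by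
  rcases p with _ | ⟨a, _ | ⟨b, _ | ⟨c, _ | ⟨d, _ | ⟨e, r⟩⟩⟩⟩⟩
  · simp [PySem.List.pyGet?, PySem.List.pyIdx?]
  · simp [PySem.List.pyGet?, PySem.List.pyIdx?]
  · simp [PySem.List.pyGet?, PySem.List.pyIdx?]
  · simp [PySem.List.pyGet?, PySem.List.pyIdx?]
  · simp [PySem.List.pyGet?, PySem.List.pyIdx?]
  · simp only [PySem.List.pyGet?_zero_cons,
      show ((1:Int) = ((1:Nat):Int)) from rfl, show ((2:Int) = ((2:Nat):Int)) from rfl,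
      show ((3:Int) = ((3:Nat):Int)) from rfl, show ((4:Int) = ((4:Nat):Int)) from rfl,
      PySem.List.pyGet?_natCast]
    simp

-- A's token-collecting loop flattens the first-five tokens of every game
theorem set_mass_eq (acc : List String) (ov : List String) :
    ov.foldl (fun acc game =>
      let acc := match PySem.List.pyGet? (pySplit game " ") 0 with | some s => acc ++ [s] | none => acc
      let acc := match PySem.List.pyGet? (pySplit game " ") 1 with | some s => acc ++ [s] | none => acc
      let acc := match PySem.List.pyGet? (pySplit game " ") 2 with | some s => acc ++ [s] | none => acc
      let acc := match PySem.List.pyGet? (pySplit game " ") 3 with | some s => acc ++ [s] | none => acc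
      match PySem.List.pyGet? (pySplit game " ") 4 with | some s => acc ++ [s] | none => acc) acc
    = acc ++ ov.flatMap (fun g => (pySplit g " ").take 5) := by
  induction ov generalizing acc with
  | nil => simp
  | cons g gs ih =>
    rw [List.foldl_cons, five_appends acc (pySplit g " "), ih, List.flatMap_cons,
        List.append_assoc]

-- A's final counting loop
theorem count_lt (i : Int) (l : List Int) :
    l.foldl (fun i sum_set_point => if sum_set_point < 18 then i + 1 else i) i
    = i + (l.countP (fun s => decide (s < 18)) : Int) := by
  induction l generalizing i with
  | nil => simp
  | cons s ss ih =>
    rw [List.foldl_cons, List.countP_cons]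
    by_cases hs : s < 18
    · rw [if_pos hs, ih, if_pos (by simpa using hs)]; push_cast; omega
    · rw [if_neg hs, ih, if_neg (by simpa using hs)]; push_cast; omega

-- A's count over the parsed sums is the total occurrence weight of the token list
theorem countP_filterMap_eq_sum_w (l : List String) :
    ((l.filterMap sumOf).countP (fun s => decide (s < 18)) : Int) = (l.map wOf).sum := by
  induction l with
  | nil => simp
  | cons t ts ih =>
    rw [List.filterMap_cons, List.map_cons, List.sum_cons, ← ih]
    unfold wOf
    rcases sumOf t with _ | s
    · simp
    · by_cases hs : s < 18
      · simp [List.countP_cons, hs]; push_cast; omega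
      · simp [List.countP_cons, hs]

-- B's per-item step contributes wOf of the token times its multiplicity
theorem b_item_step (total : Int) (p : String × Int) :
    (match pySplit p.1 ":" with
     | p0 :: p1 :: _ =>
       match PySem.Int.ofStr? p0, PySem.Int.ofStr? p1 with
       | some a, some b => if a + b < 18 then total + p.2 else total
       | _, _ => total
     | _ => total) = total + wOf p.1 * p.2 := by
  unfold wOf sumOf
  rcases h : pySplit p.1 ":" with _ | ⟨p0, _ | ⟨p1, r⟩⟩ <;> simp only [h] <;>
    first
    | simp
    | (rcases ha : PySem.Int.ofStr? p0 with _ | a <;>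
       rcases hb : PySem.Int.ofStr? p1 with _ | b <;> simp [ha, hb] <;>
       by_cases hs : a + b < 18 <;> simp [hs])

-- over a Nodup list containing x, the ite-sum picks out exactly w x
theorem sum_map_ite_mem {S : List String} (w : String → Int) (x : String)
    (hnd : S.Nodup) (hx : x ∈ S) :
    (S.map (fun k => if k = x then w k else 0)).sum = w x := by
  induction S with
  | nil => cases hx
  | cons a S ih =>
    rcases List.nodup_cons.mp hnd with ⟨ha, hS⟩
    rcases List.mem_cons.mp hx with rfl | hx'
    · rw [List.map_cons, List.sum_cons, if_pos rfl]
      have : (S.map (fun k => if k = x then w k else 0)).sum = 0 := by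
        apply List.sum_eq_zero
        intro y hy
        rcases List.mem_map.mp hy with ⟨k, hk, rfl⟩
        rw [if_neg]; rintro rfl; exact ha hk
      rw [this, add_zero]
    · rw [List.map_cons, List.sum_cons, if_neg (by rintro rfl; exact ha hx'), zero_add]
      exact ih hS hx'

-- summing multiplicity-weighted w over the distinct tokens = summing w over all occurrences
theorem sum_counts_eq (w : String → Int) (S : List String) (hnd : S.Nodup)
    (l : List String) (hsub : ∀ x ∈ l, x ∈ S) :
    (S.map (fun k => w k * (l.count k : Int))).sum = (l.map w).sum := by
  induction l with
  | nil => simp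
  | cons x l' ih =>
    have hx : x ∈ S := hsub x List.mem_cons_self
    have hstep : (S.map (fun k => w k * ((x :: l').count k : Int)))
        = S.map (fun k => w k * (l'.count k : Int) + (if k = x then w k else 0)) := by
      apply List.map_congr_left
      intro k _
      rw [List.count_cons]
      by_cases hk : k = x
      · subst hk; simp [mul_add]
      · have hxk : ¬ x = k := fun h => hk h.symm
        simp [hk, hxk]
    rw [hstep, PySem.List.sum_map_add_int,
        ih (fun y hy => hsub y (List.mem_cons_of_mem x hy)),
        sum_map_ite_mem w x hnd hx, List.map_cons, List.sum_cons]
    ring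

-- ===== VERDICT (by name: the statement is the Claim_ definition above) =====
theorem kol_set_18_menshe_spec : Claim_equal_kol_set_18_menshe := by
  intro ov _
  show kol_set_18_menshe ov = kol_set_18_menshe_alt ov
  -- A's value, written out (rfl through the lets), then reduced to the weight sum
  have hA : kol_set_18_menshe ov =
      List.foldl (fun i sum_set_point => if sum_set_point < 18 then i + 1 else i) (0 : Int)
        (List.foldl (fun acc si =>
          match PySem.List.pyGet? (pySplit si ":") 0 with
          | none => acc
          | some s1 =>
            match PySem.List.pyGet? (pySplit si ":") 1 with
            | none => acc
            | some s2 =>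
              match PySem.Int.ofStr? s1, PySem.Int.ofStr? s2 with
              | some a, some b => acc ++ [a + b]
              | _, _ => acc) []
          (List.foldl (fun acc game =>
            let acc := match PySem.List.pyGet? (pySplit game " ") 0 with | some s => acc ++ [s] | none => acc
            let acc := match PySem.List.pyGet? (pySplit game " ") 1 with | some s => acc ++ [s] | none => acc
            let acc := match PySem.List.pyGet? (pySplit game " ") 2 with | some s => acc ++ [s] | none => acc
            let acc := match PySem.List.pyGet? (pySplit game " ") 3 with | some s => acc ++ [s] | none => acc
            match PySem.List.pyGet? (pySplit game " ") 4 with | some s => acc ++ [s] | none => acc) [] ov)) := rfl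
  -- B's frequency table is Counter(toks)
  have hfreq : ov.foldl (fun d game =>
      ((pySplit game " ").take 5).foldl (fun d tok => d.insert tok (d.getD tok 0 + 1)) d)
      PySem.Dict.empty
      = PySem.Dict.counter (ov.flatMap (fun g => (pySplit g " ").take 5)) := by
    rw [← PySem.Dict.foldl_insert_getD_add_one_eq_counter, List.foldl_flatMap]
  -- B's value reduced to the same weight sum
  have hB : kol_set_18_menshe_alt ov
      = ((ov.flatMap (fun g => (pySplit g " ").take 5)).map wOf).sum := by
    have hBdef : kol_set_18_menshe_alt ov =
        ((ov.foldl (fun d game =>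
            ((pySplit game " ").take 5).foldl (fun d tok => d.insert tok (d.getD tok 0 + 1)) d)
            PySem.Dict.empty).items.foldl (fun total p =>
          match pySplit p.1 ":" with
          | p0 :: p1 :: _ =>
            match PySem.Int.ofStr? p0, PySem.Int.ofStr? p1 with
            | some a, some b => if a + b < 18 then total + p.2 else total
            | _, _ => total
          | _ => total) 0) := rfl
    rw [hBdef, hfreq]
    calc ((PySem.Dict.counter (ov.flatMap (fun g => (pySplit g " ").take 5))).items.foldl
            (fun total p =>
            match pySplit p.1 ":" with
            | p0 :: p1 :: _ =>
              match PySem.Int.ofStr? p0, PySem.Int.ofStr? p1 with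
              | some a, some b => if a + b < 18 then total + p.2 else total
              | _, _ => total
            | _ => total) 0)
        = ((PySem.Dict.counter (ov.flatMap (fun g => (pySplit g " ").take 5))).items.foldl
            (fun total p => total + wOf p.1 * p.2) 0) :=
          PySem.List.foldl_congr_mem _ _ _ 0 (fun total p _ => b_item_step total p)
      _ = (((PySem.Dict.counter (ov.flatMap (fun g => (pySplit g " ").take 5))).items.map
            (fun p => wOf p.1 * p.2)).sum) := by
          rw [PySem.List.foldl_add, zero_add]
      _ = ((PySem.Set.ofList (ov.flatMap (fun g => (pySplit g " ").take 5))).map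
            (fun k => wOf k * ((ov.flatMap (fun g => (pySplit g " ").take 5)).count k : Int))).sum := by
          rw [PySem.Dict.items_counter, List.map_map]; rfl
      _ = ((ov.flatMap (fun g => (pySplit g " ").take 5)).map wOf).sum :=
          sum_counts_eq wOf _ (PySem.Set.nodup_ofList _) _
            (fun x hx => (PySem.Set.mem_ofList _ x).mpr hx)
  rw [hA, set_mass_eq, List.nil_append, summ_eq, List.nil_append, count_lt,
      countP_filterMap_eq_sum_w, zero_add, hB]
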